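-- pv_equiv track=rewrite | github.com/Glueymetal/Cryptography_CIA | cia.py | gronsfeld_decrypt
-- ===== SOURCE A (Python) =====
-- def gronsfeld_decrypt(ciphertext,key):
--     plaintext = ""
--
--     alpha_count = sum(1 for c in ciphertext if c.isalpha())
--     while len(key) < alpha_count:
--         key += key
--
--     key_index = 0
--
--     for i in range(len(ciphertext)):
--         c = ciphertext[i]
--         if c.isalpha():
--             shift = int(key[key_index])
--             key_index += 1
--             base = ord('A')
--             plaintext = plaintext + chr((ord(c) - base - shift) % 26 + base)
--         else:
--             plaintext = plaintext + c
--
--     return plaintext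
-- ===== SOURCE B (Python) =====
-- def gronsfeld_decrypt(ciphertext, key):
--     # staged: extract letters, decrypt the letter stream against a cycled key, re-merge
--     letters = [c for c in ciphertext if c.isalpha()]
--     if letters:
--         reps = -(-len(letters) // len(key))
--         shifts = (key * reps)[:len(letters)]
--         dec = [chr((ord(c) - 65 - int(k)) % 26 + 65) for c, k in zip(letters, shifts)]
--     else:
--         dec = []
--     it = iter(dec)
--     return "".join(next(it) if c.isalpha() else c for c in ciphertext)
-- ===== Notes on version B (the rewrite author's own statement) =====
-- stated objective: alternative
-- what changed: B is staged instead of A's single stateful loop: it extracts the letters, builds the needed cyclic shift sequence by ceiling-division key repetition, decrypts the letter stream with zip, and merges the decrypted letters back over the non-letters; A instead doubles the key until long enough and appends to a string in one indexed for-loop.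
import Mathlib
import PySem

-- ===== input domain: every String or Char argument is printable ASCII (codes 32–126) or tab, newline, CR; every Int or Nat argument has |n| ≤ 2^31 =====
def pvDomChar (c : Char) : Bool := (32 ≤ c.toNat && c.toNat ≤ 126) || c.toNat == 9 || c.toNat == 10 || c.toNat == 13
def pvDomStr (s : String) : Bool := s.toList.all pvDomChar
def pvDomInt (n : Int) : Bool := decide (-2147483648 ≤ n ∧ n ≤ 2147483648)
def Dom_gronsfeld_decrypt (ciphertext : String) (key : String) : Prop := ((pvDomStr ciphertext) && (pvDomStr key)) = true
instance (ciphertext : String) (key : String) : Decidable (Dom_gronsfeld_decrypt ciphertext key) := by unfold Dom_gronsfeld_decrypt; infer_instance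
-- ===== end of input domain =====

-- B replaces A's single stateful loop (key doubling + indexed append) by staged passes:
-- extract the letters, decrypt that stream against a ceil-repeated key with zip, merge back.

-- helpers shared by both ports: both Python versions compute int(<one-char key string>)
-- and chr((ord(c) - 65 - shift) % 26 + 65) with literally the same expressions.
-- int(single char); Python raises ValueError when ofStr? is none — those inputs are outside Pre_.
def pvCharInt (c : Char) : Int := (PySem.Int.ofStr? (String.mk [c])).getD 0

def pvDecChar (c : Char) (shift : Int) : Char :=
  Char.ofNat ((PySem.Int.mod ((c.toNat : Int) - 65 - shift) 26 + 65).toNat)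

-- ===== PORT A =====
-- while len(key) < alpha_count: key += key.
-- Fuel n+1 makes the loop total in Lean; with key = "" and alpha_count > 0 Python diverges,
-- which Pre_ excludes.
def pvA_grow : Nat → List Char → Nat → List Char
  | 0, k, _ => k
  | fuel + 1, k, n => if k.length < n then pvA_grow fuel (k ++ k) n else k

-- the for-loop: state (plaintext, key_index); plaintext = plaintext + ch.
-- key[key_index] out of range (unreachable inside Pre_) would be an IndexError: shift defaults to 0 there.
def pvA_loop (key2 : List Char) : List Char → List Char → Nat → List Char
  | [], plaintext, _ => plaintext
  | c :: rest, plaintext, keyIndex =>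
    if PySem.Chars.isalpha c then
      let shift : Int :=
        match PySem.List.pyGet? key2 (keyIndex : Int) with
        | some ch => pvCharInt ch
        | none => 0
      pvA_loop key2 rest (plaintext ++ [pvDecChar c shift]) (keyIndex + 1)
    else
      pvA_loop key2 rest (plaintext ++ [c]) keyIndex

def gronsfeld_decrypt (ciphertext : String) (key : String) : String :=
  let cs := ciphertext.toList
  let alpha_count := (cs.filter PySem.Chars.isalpha).length
  let key2 := pvA_grow (alpha_count + 1) key.toList alpha_count
  String.mk (pvA_loop key2 cs [] 0)

-- ===== PORT B =====
-- key * reps in Python: string repetition (empty for reps ≤ 0, hence .toNat)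
def pvRepeat (key : List Char) : Nat → List Char
  | 0 => []
  | m + 1 => key ++ pvRepeat key m

-- "".join(next(it) if c.isalpha() else c for c in ciphertext): consume the decrypted
-- letters in order.  An exhausted iterator (unreachable: dec has one entry per letter)
-- would raise in Python; the port stops there.
def pvMerge : List Char → List Char → List Char
  | [], _ => []
  | c :: rest, ds =>
    if PySem.Chars.isalpha c then
      match ds with
      | d :: ds' => d :: pvMerge rest ds'
      | [] => []
    else c :: pvMerge rest ds

def gronsfeld_decrypt_alt (ciphertext : String) (key : String) : String :=
  let cs := ciphertext.toList
  let ks := key.toList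
  let letters := cs.filter PySem.Chars.isalpha
  let dec : List Char :=
    if letters ≠ [] then
      -- reps = -(-len(letters) // len(key)); len(key) = 0 (ZeroDivisionError) is outside Pre_
      let reps : Int := -(PySem.Int.floordiv (-(letters.length : Int)) (ks.length : Int))
      -- (key * reps)[:len(letters)] : take is exact for this nonnegative slice
      let shifts := (pvRepeat ks reps.toNat).take letters.length
      (letters.zip shifts).map (fun p => pvDecChar p.1 (pvCharInt p.2))
    else []
  String.mk (pvMerge cs dec)

-- ===== PRECONDITION & SPEC =====
-- Pre_ is exactly where Python A returns: if the ciphertext contains letters, the key must be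
-- non-empty (else A's doubling loop diverges) and every key position actually used — i % len(key)
-- for each letter index i — must hold a digit (else int() raises ValueError).
def Pre_gronsfeld_decrypt (ciphertext : String) (key : String) : Prop :=
  (ciphertext.toList.filter PySem.Chars.isalpha).length = 0 ∨
    (key.toList ≠ [] ∧
      ∀ i ∈ List.range (ciphertext.toList.filter PySem.Chars.isalpha).length,
        (key.toList.getD (i % key.toList.length) ' ').isDigit = true)
instance (ciphertext : String) (key : String) : Decidable (Pre_gronsfeld_decrypt ciphertext key) := by
  unfold Pre_gronsfeld_decrypt; infer_instance

def pvWitness_gronsfeld_decrypt : String × String := ("Khoor, Zruog!", "333")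

def Spec_gronsfeld_decrypt (ciphertext : String) (key : String) (out : String) : Prop := out = gronsfeld_decrypt_alt ciphertext key
instance (ciphertext : String) (key : String) (out : String) : Decidable (Spec_gronsfeld_decrypt ciphertext key out) := by unfold Spec_gronsfeld_decrypt; infer_instance

-- ===== CLAIM (what is proved, stated in full; the proofs are below) =====
def Claim_equal_gronsfeld_decrypt : Prop := ∀ (ciphertext : String) (key : String), Dom_gronsfeld_decrypt ciphertext key → Pre_gronsfeld_decrypt ciphertext key → Spec_gronsfeld_decrypt ciphertext key (gronsfeld_decrypt ciphertext key)

-- ===== LEMMAS AND PROOFS =====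

-- proof-only intermediate form: single pass with cyclic key lookup; both ports reduce to it
def pvB_go (ks : List Char) : List Char → Nat → List Char
  | [], _ => []
  | c :: rest, j =>
    if PySem.Chars.isalpha c then
      let shift : Int :=
        match PySem.List.pyGet? ks ((j % ks.length : Nat) : Int) with
        | some ch => pvCharInt ch
        | none => 0
      pvDecChar c shift :: pvB_go ks rest (j + 1)
    else
      c :: pvB_go ks rest j

theorem pvRepeat_add (key : List Char) (a b : Nat) :
    pvRepeat key (a + b) = pvRepeat key a ++ pvRepeat key b := by
  induction a with
  | zero => simp [pvRepeat]
  | succ a ih =>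
      have : a + 1 + b = (a + b) + 1 := by omega
      rw [this]
      simp [pvRepeat, ih]

theorem pvRepeat_length (key : List Char) (m : Nat) :
    (pvRepeat key m).length = m * key.length := by
  induction m with
  | zero => simp [pvRepeat]
  | succ m ih => simp [pvRepeat, ih]; ring

theorem pvA_grow_cycle (key : List Char) :
    ∀ (fuel : Nat) (l : List Char) (n m : Nat), l = pvRepeat key m →
      ∃ m', pvA_grow fuel l n = pvRepeat key m' := by
  intro fuel
  induction fuel with
  | zero => intro l n m hl; exact ⟨m, by simpa [pvA_grow] using hl⟩
  | succ fuel ih =>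
      intro l n m hl
      by_cases h : l.length < n
      · have : l ++ l = pvRepeat key (m + m) := by rw [pvRepeat_add, hl]
        rcases ih (l ++ l) n (m + m) this with ⟨m', hm'⟩
        exact ⟨m', by simp [pvA_grow, h, hm']⟩
      · subst hl; exact ⟨m, by rw [pvA_grow, if_neg h]⟩

theorem pvA_grow_length :
    ∀ (fuel : Nat) (l : List Char) (n : Nat), l ≠ [] →
      min n (l.length + fuel) ≤ (pvA_grow fuel l n).length := by
  intro fuel
  induction fuel with
  | zero => intro l n _; simp [pvA_grow]
  | succ fuel ih =>
      intro l n hl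
      by_cases h : l.length < n
      · have h2 := ih (l ++ l) n (by simp [hl])
        simp [pvA_grow, h]
        simp at h2
        have hpos : 1 ≤ l.length := List.length_pos_of_ne_nil hl
        omega
      · simp [pvA_grow, h]
        omega

theorem pvRepeat_getElem? (key : List Char) :
    ∀ (m i : Nat), i < m * key.length →
      (pvRepeat key m)[i]? = key[i % key.length]? := by
  intro m
  induction m with
  | zero => intro i hi; simp at hi
  | succ m ih =>
      intro i hi
      by_cases h : i < key.length
      · rw [pvRepeat, List.getElem?_append_left h, Nat.mod_eq_of_lt h]
      · have hkpos : 0 < key.length := by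
          rcases Nat.eq_zero_or_pos key.length with h0 | h0
          · rw [h0, Nat.mul_zero] at hi; omega
          · exact h0
        have hle : key.length ≤ i := by omega
        rw [pvRepeat, List.getElem?_append_right hle]
        have : (i - key.length) % key.length = i % key.length := by
          conv_rhs => rw [← Nat.sub_add_cancel hle]
          rw [Nat.add_mod_right]
        have hexp : (m + 1) * key.length = m * key.length + key.length := by ring
        rw [ih (i - key.length) (by omega), this]

-- A's loop equals the intermediate single pass, parametrised by the lookup agreement H
theorem pv_loop_eq (key2 ks : List Char) (ac : Nat)
    (H : ∀ i, i < ac →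
      PySem.List.pyGet? key2 (i : Int) = PySem.List.pyGet? ks ((i % ks.length : Nat) : Int)) :
    ∀ (cs : List Char) (acc : List Char) (j : Nat),
      j + (cs.filter PySem.Chars.isalpha).length ≤ ac →
      pvA_loop key2 cs acc j = acc ++ pvB_go ks cs j := by
  intro cs
  induction cs with
  | nil => intro acc j _; simp [pvA_loop, pvB_go]
  | cons c rest ih =>
      intro acc j hj
      by_cases hc : PySem.Chars.isalpha c
      · have hcnt : (rest.filter PySem.Chars.isalpha).length + 1
            = ((c :: rest).filter PySem.Chars.isalpha).length := by
          simp [hc]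
        have hjlt : j < ac := by omega
        rw [pvA_loop, pvB_go]
        simp only [hc, if_pos]
        rw [H j hjlt]
        rw [ih (acc ++ [pvDecChar c _]) (j + 1) (by omega)]
        simp
      · have hcnt : (rest.filter PySem.Chars.isalpha).length
            = ((c :: rest).filter PySem.Chars.isalpha).length := by
          simp [hc]
        rw [pvA_loop, pvB_go]
        simp only [hc, if_neg, Bool.false_eq_true, not_false_iff]
        rw [ih (acc ++ [c]) j (by omega)]
        simp

theorem pv_main (cs ks : List Char)
    (h0 : (cs.filter PySem.Chars.isalpha).length = 0 ∨ ks ≠ []) :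
    pvA_loop (pvA_grow ((cs.filter PySem.Chars.isalpha).length + 1) ks
        ((cs.filter PySem.Chars.isalpha).length)) cs [] 0
      = pvB_go ks cs 0 := by
  set ac := (cs.filter PySem.Chars.isalpha).length with hac
  have H : ∀ i, i < ac →
      PySem.List.pyGet? (pvA_grow (ac + 1) ks ac) (i : Int)
        = PySem.List.pyGet? ks ((i % ks.length : Nat) : Int) := by
    intro i hi
    have hks_ne : ks ≠ [] := by
      rcases h0 with h0 | h0
      · omega
      · exact h0
    rcases pvA_grow_cycle ks (ac + 1) ks ac 1 (by simp [pvRepeat]) with ⟨m', hm'⟩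
    have hlen : ac ≤ (pvA_grow (ac + 1) ks ac).length := by
      have := pvA_grow_length (ac + 1) ks ac hks_ne
      have hpos : 1 ≤ ks.length := List.length_pos_of_ne_nil hks_ne
      omega
    have hmul : i < m' * ks.length := by
      have := pvRepeat_length ks m'
      rw [hm'] at hlen
      omega
    rw [hm', PySem.List.pyGet?_natCast, PySem.List.pyGet?_natCast]
    exact pvRepeat_getElem? ks m' i hmul
  have := pv_loop_eq (pvA_grow (ac + 1) ks ac) ks ac H cs [] 0 (by omega)
  simpa using this

-- ===== B-side lemmas: the staged construction also equals the single pass =====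

-- the cyclic shift value the single pass uses at letter index j
def pvSft (ks : List Char) (j : Nat) : Int :=
  match PySem.List.pyGet? ks ((j % ks.length : Nat) : Int) with
  | some ch => pvCharInt ch
  | none => 0

-- decrypted letter stream of cs starting at letter index j (proof-only)
def pvDecFrom (ks : List Char) : List Char → Nat → List Char
  | [], _ => []
  | c :: rest, j =>
    if PySem.Chars.isalpha c then pvDecChar c (pvSft ks j) :: pvDecFrom ks rest (j + 1)
    else pvDecFrom ks rest j

theorem pvMerge_dec (ks : List Char) :
    ∀ (cs : List Char) (j : Nat), pvMerge cs (pvDecFrom ks cs j) = pvB_go ks cs j := by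
  intro cs
  induction cs with
  | nil => intro j; simp [pvMerge, pvB_go]
  | cons c rest ih =>
      intro j
      by_cases hc : PySem.Chars.isalpha c
      · simp only [pvDecFrom, pvMerge, pvB_go, hc, if_pos]
        rw [ih (j + 1)]
        rfl
      · simp only [pvDecFrom, pvMerge, pvB_go, hc, Bool.false_eq_true, if_neg, not_false_iff]
        rw [ih j]

theorem pvDecFrom_length (ks : List Char) :
    ∀ (cs : List Char) (j : Nat),
      (pvDecFrom ks cs j).length = (cs.filter PySem.Chars.isalpha).length := by
  intro cs
  induction cs with
  | nil => intro j; simp [pvDecFrom]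
  | cons c rest ih =>
      intro j
      by_cases hc : PySem.Chars.isalpha c
      · simp [pvDecFrom, hc, ih]
      · simp [pvDecFrom, hc, ih]

theorem pvDecFrom_getElem? (ks : List Char) :
    ∀ (cs : List Char) (j i : Nat),
      (pvDecFrom ks cs j)[i]? =
        ((cs.filter PySem.Chars.isalpha)[i]?).map (fun c => pvDecChar c (pvSft ks (j + i))) := by
  intro cs
  induction cs with
  | nil => intro j i; simp [pvDecFrom]
  | cons c rest ih =>
      intro j i
      by_cases hc : PySem.Chars.isalpha c
      · cases i with
        | zero => simp [pvDecFrom, hc]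
        | succ i =>
            simp only [pvDecFrom, hc, if_pos, List.filter_cons_of_pos,
              List.getElem?_cons_succ]
            rw [ih (j + 1) i]
            have : j + 1 + i = j + (i + 1) := by omega
            rw [this]
      · simp only [pvDecFrom, hc, Bool.false_eq_true, if_neg, not_false_iff,
          List.filter_cons_of_neg]
        exact ih j i

-- the integer ceiling -(-n // k) computed by B equals the Nat ceiling (n + k - 1) / k
theorem pv_ceil_eq (n k : Nat) (hk : 0 < k) :
    (-(PySem.Int.floordiv (-(n : Int)) (k : Int))).toNat = (n + k - 1) / k := by
  set q := (n + k - 1) / k with hq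
  have hdm := Nat.div_add_mod (n + k - 1) k
  have hmlt : (n + k - 1) % k < k := Nat.mod_lt _ hk
  have hdmZ : (k : Int) * (q : Int) + (((n + k - 1) % k : Nat) : Int) = (n : Int) + k - 1 := by
    have : ((n + k - 1 : Nat) : Int) = (n : Int) + k - 1 := by omega
    rw [← this]; exact_mod_cast hdm
  have hmZ : (0 : Int) ≤ (((n + k - 1) % k : Nat) : Int) := by positivity
  have hmltZ : (((n + k - 1) % k : Nat) : Int) < (k : Int) := by exact_mod_cast hmlt
  have hkZ : (0 : Int) < (k : Int) := by exact_mod_cast hk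
  have hbounds : ((q : Int) - 1) * (k : Int) < (n : Int) ∧ (n : Int) ≤ (q : Int) * (k : Int) := by
    constructor <;> nlinarith [hdmZ, hmZ, hmltZ, hkZ]
  have heq := (PySem.Int.neg_floordiv_neg_eq_iff_of_pos (a := (n : Int)) (b := (k : Int))
      (q := (q : Int)) hkZ).mpr hbounds
  rw [heq]; simp

theorem pv_dec_eq_decFrom (cs ks : List Char) (hks : ks ≠ []) :
    ((cs.filter PySem.Chars.isalpha).zip
        ((pvRepeat ks (-(PySem.Int.floordiv
            (-(((cs.filter PySem.Chars.isalpha).length : Nat) : Int))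
            ((ks.length : Nat) : Int))).toNat).take
          (cs.filter PySem.Chars.isalpha).length)).map
        (fun p => pvDecChar p.1 (pvCharInt p.2))
      = pvDecFrom ks cs 0 := by
  set letters := cs.filter PySem.Chars.isalpha with hl
  set n := letters.length with hn
  have hkpos : 0 < ks.length := List.length_pos_of_ne_nil hks
  set reps := (-(PySem.Int.floordiv (-(n : Int)) ((ks.length : Nat) : Int))).toNat with hreps
  have hrepsv : reps = (n + ks.length - 1) / ks.length := by
    rw [hreps]; exact pv_ceil_eq n ks.length hkpos
  have hcover : n ≤ reps * ks.length := by
    rw [hrepsv, Nat.mul_comm]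
    have hdm := Nat.div_add_mod (n + ks.length - 1) ks.length
    have hmlt : (n + ks.length - 1) % ks.length < ks.length := Nat.mod_lt _ hkpos
    omega
  have hrlen : (pvRepeat ks reps).length = reps * ks.length := pvRepeat_length ks reps
  have hslen : ((pvRepeat ks reps).take n).length = n := by
    rw [List.length_take]; omega
  have hdlen : (pvDecFrom ks cs 0).length = n := by
    rw [pvDecFrom_length, ← hl, ← hn]
  have hzlen : ((letters.zip ((pvRepeat ks reps).take n)).map
      (fun p => pvDecChar p.1 (pvCharInt p.2))).length = n := by
    rw [List.length_map, List.length_zip, hslen, ← hn]; omega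
  apply List.ext_getElem (by rw [hzlen, hdlen])
  intro i h1 h2
  have hi : i < n := by rw [hzlen] at h1; exact h1
  have hilt : i < letters.length := by omega
  have himod : i % ks.length < ks.length := Nat.mod_lt _ hkpos
  rw [List.getElem_map, List.getElem_zip]
  have hrep_i : i < (pvRepeat ks reps).length := by rw [hrlen]; omega
  have hsh : ((pvRepeat ks reps).take n)[i] = ks[i % ks.length] := by
    rw [List.getElem_take]
    have hq := pvRepeat_getElem? ks reps i (by omega)
    rw [List.getElem?_eq_getElem hrep_i, List.getElem?_eq_getElem himod] at hq
    exact Option.some.inj hq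
  have hR : (pvDecFrom ks cs 0)[i]? = some (pvDecChar letters[i] (pvSft ks i)) := by
    rw [pvDecFrom_getElem?, ← hl]
    rw [List.getElem?_eq_getElem hilt]
    simp
  rw [List.getElem?_eq_getElem h2] at hR
  rw [Option.some.inj hR]
  have hsft : pvSft ks i = pvCharInt (ks[i % ks.length]) := by
    unfold pvSft
    rw [PySem.List.pyGet?_natCast, List.getElem?_eq_getElem himod]
  rw [hsh, hsft]

-- pvDecFrom is empty when the ciphertext has no letters
theorem pvDecFrom_nil (ks : List Char) (cs : List Char)
    (h : cs.filter PySem.Chars.isalpha = []) (j : Nat) : pvDecFrom ks cs j = [] := by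
  have hl := pvDecFrom_length ks cs j
  rw [h] at hl
  exact List.eq_nil_of_length_eq_zero hl

-- ===== VERDICT (by name: the statement is the Claim_ definition above) =====
theorem gronsfeld_decrypt_spec : Claim_equal_gronsfeld_decrypt := by
  intro ciphertext key _ hpre
  unfold Spec_gronsfeld_decrypt
  set cs := ciphertext.toList with hcs
  set ks := key.toList with hks
  have h0 : (cs.filter PySem.Chars.isalpha).length = 0 ∨ ks ≠ [] := by
    rcases hpre with h | ⟨h, _⟩
    · exact Or.inl h
    · exact Or.inr h
  show String.mk (pvA_loop (pvA_grow ((cs.filter PySem.Chars.isalpha).length + 1)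
      ks ((cs.filter PySem.Chars.isalpha).length)) cs [] 0) = _
  rw [pv_main cs ks h0]
  unfold gronsfeld_decrypt_alt
  rw [← hcs, ← hks]
  by_cases hl : cs.filter PySem.Chars.isalpha = []
  · simp only [hl, ne_eq, not_true_eq_false, if_false]
    rw [← pvDecFrom_nil ks cs hl 0, pvMerge_dec]
  · have hks_ne : ks ≠ [] := by
      rcases h0 with h0 | h0
      · exact absurd (List.eq_nil_of_length_eq_zero h0) hl
      · exact h0
    simp only [hl, ne_eq, not_false_iff, if_true]
    rw [pv_dec_eq_decFrom cs ks hks_ne, pvMerge_dec]
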